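-- pv_equiv track=rewrite | github.com/zmunk/adventofcode2023 | day11.py | get_expansion
-- ===== SOURCE A (Python) =====
-- def get_expansion(vals, max_val, expansion_increment=2):
--     expansion_constant = 0
--     expansion = {}
--     for val in range(max_val):
--         if val in vals:
--             expansion[val] = val + expansion_constant
--         else:
--             expansion_constant += expansion_increment - 1
--     return expansion
-- ===== SOURCE B (Python) =====
-- def get_expansion(vals, max_val, expansion_increment=2):
--     occ = sorted({v for v in vals if 0 <= v < max_val})
--     return {v: v + (v - k) * (expansion_increment - 1) for k, v in enumerate(occ)}
-- ===== Notes on version B (the rewrite author's own statement) =====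
-- stated objective: faster
-- what changed: Instead of scanning every value in range(max_val) with a linear membership test and threading a running offset, B sorts the distinct in-range values and computes each entry in closed form from its rank: val + (val - rank) * (increment - 1).
import Mathlib
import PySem

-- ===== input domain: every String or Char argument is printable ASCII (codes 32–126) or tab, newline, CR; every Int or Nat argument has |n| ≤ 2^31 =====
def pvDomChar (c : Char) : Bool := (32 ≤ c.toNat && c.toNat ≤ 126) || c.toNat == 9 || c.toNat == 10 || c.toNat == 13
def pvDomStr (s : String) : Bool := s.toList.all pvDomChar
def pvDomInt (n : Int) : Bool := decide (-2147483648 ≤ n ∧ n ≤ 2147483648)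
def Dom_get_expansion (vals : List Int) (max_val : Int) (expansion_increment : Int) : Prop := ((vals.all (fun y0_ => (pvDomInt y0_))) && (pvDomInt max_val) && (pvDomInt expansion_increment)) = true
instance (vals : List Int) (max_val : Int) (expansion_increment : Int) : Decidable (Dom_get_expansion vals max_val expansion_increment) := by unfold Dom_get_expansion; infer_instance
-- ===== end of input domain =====

-- B replaces A's scan of the whole range(max_val) by sorting the distinct in-range values and
-- computing each entry in closed form from its rank (objective: faster).

-- ===== PORT A =====
-- the loop body of A: state = (expansion_constant, expansion dict)
def peStep (vals : List Int) (expansion_increment : Int)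
    (s : Int × PySem.Dict Int Int) (val : Int) : Int × PySem.Dict Int Int :=
  if val ∈ vals then (s.1, s.2.insert val (val + s.1))
  else (s.1 + (expansion_increment - 1), s.2)

def get_expansion (vals : List Int) (max_val : Int) (expansion_increment : Int) : List (Int × Int) :=
  ((PySem.List.pyRange 0 max_val 1).foldl (peStep vals expansion_increment)
    (0, PySem.Dict.empty)).2.items

-- ===== PORT B =====
def get_expansion_alt (vals : List Int) (max_val : Int) (expansion_increment : Int) : List (Int × Int) :=
  let occ := PySem.List.sorted (PySem.Set.ofList (vals.filter (fun v => decide (0 ≤ v ∧ v < max_val)))) (fun x => x)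
  (PySem.List.enumerate occ 0).map (fun p => (p.2, p.2 + (p.2 - p.1) * (expansion_increment - 1)))

-- ===== PRECONDITION & SPEC =====
def Spec_get_expansion (vals : List Int) (max_val : Int) (expansion_increment : Int) (out : List (Int × Int)) : Prop := out = get_expansion_alt vals max_val expansion_increment
instance (vals : List Int) (max_val : Int) (expansion_increment : Int) (out : List (Int × Int)) : Decidable (Spec_get_expansion vals max_val expansion_increment out) := by unfold Spec_get_expansion; infer_instance

-- ===== CLAIM (what is proved, stated in full; the proofs are below) =====
def Claim_equal_get_expansion : Prop := ∀ (vals : List Int) (max_val : Int) (expansion_increment : Int), Dom_get_expansion vals max_val expansion_increment → Spec_get_expansion vals max_val expansion_increment (get_expansion vals max_val expansion_increment)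

-- ===== LEMMAS AND PROOFS =====

-- the values of vals that lie in [0, n), in ascending order
def peOcc (vals : List Int) (n : Nat) : List Int :=
  (PySem.List.pyRange 0 (n : Int) 1).filter (fun v => decide (v ∈ vals))

-- the entry B produces for a value paired with its rank
def peG (expansion_increment : Int) (p : Int × Int) : Int × Int :=
  (p.2, p.2 + (p.2 - p.1) * (expansion_increment - 1))

lemma peOcc_succ (vals : List Int) (n : Nat) :
    peOcc vals (n + 1) =
      peOcc vals n ++ (if (n : Int) ∈ vals then [(n : Int)] else []) := by
  unfold peOcc
  have h : ((n + 1 : Nat) : Int) = (n : Int) + 1 := by push_cast; ring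
  rw [h, PySem.List.pyRange_one_succ_right (by positivity), List.filter_append]
  by_cases hv : (n : Int) ∈ vals <;> simp [List.filter, hv]

lemma peOcc_pairwise (vals : List Int) (n : Nat) :
    (peOcc vals n).Pairwise (· < ·) := by
  unfold peOcc
  apply List.Pairwise.filter
  rw [PySem.List.pyRange_zero_natCast]
  exact (List.pairwise_lt_range (n := n)).map _ (by intro a b hab; exact_mod_cast hab)

lemma peOcc_mem (vals : List Int) (n : Nat) (v : Int) :
    v ∈ peOcc vals n ↔ (0 ≤ v ∧ v < (n : Int)) ∧ v ∈ vals := by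
  unfold peOcc
  rw [List.mem_filter, PySem.List.mem_pyRange_one]
  simp

-- main invariant of A's loop over range(n): the running constant counts the unoccupied
-- values below n, and the dict holds B's closed-form entry for every occupied value so far
lemma peMain (vals : List Int) (inc : Int) (n : Nat) :
    (PySem.List.pyRange 0 (n : Int) 1).foldl (peStep vals inc) (0, PySem.Dict.empty)
      = ((inc - 1) * ((n : Int) - (peOcc vals n).length),
         PySem.Dict.mk ((PySem.List.enumerate (peOcc vals n) 0).map (peG inc))) := by
  induction n with
  | zero => simp [show peOcc vals 0 = [] from rfl]; rfl
  | succ n ih =>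
    have h : ((n + 1 : Nat) : Int) = (n : Int) + 1 := by push_cast; ring
    rw [h, PySem.List.pyRange_one_succ_right (by positivity), List.foldl_append, ih]
    by_cases hv : (n : Int) ∈ vals
    · have hc : (PySem.Dict.mk ((PySem.List.enumerate (peOcc vals n) 0).map (peG inc))).contains (n : Int) = false := by
        rw [PySem.Dict.contains_mk]
        simp only [List.any_eq_false]
        rintro p hp
        simp only [List.mem_map] at hp
        obtain ⟨q, hq, rfl⟩ := hp
        have : q.2 ∈ peOcc vals n := by
          obtain ⟨k, hk, rfl⟩ := (PySem.List.mem_enumerate_iff _ _ _).mp hq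
          exact List.getElem_mem _
        have hlt := ((peOcc_mem vals n q.2).1 this).1.2
        simp [peG]
        omega
      have hins := PySem.Dict.items_insert_of_not_contains
        (PySem.Dict.mk ((PySem.List.enumerate (peOcc vals n) 0).map (peG inc)))
        ((n : Int) + (inc - 1) * ((n : Int) - (peOcc vals n).length)) hc
      simp only [List.foldl_cons, List.foldl_nil, peStep, hv, if_pos]
      rw [peOcc_succ, if_pos hv]
      apply Prod.ext
      · simp only [List.length_append, List.length_cons, List.length_nil]
        push_cast
        ring
      · apply PySem.Dict.ext
        rw [hins]
        rw [PySem.List.enumerate_append, List.map_append]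
        congr 1
        simp [peG, PySem.List.enumerate]
        ring
    · simp only [List.foldl_cons, List.foldl_nil, peStep, hv, if_false]
      rw [peOcc_succ, if_neg hv]
      apply Prod.ext
      · simp only [List.length_append, List.length_nil]
        push_cast
        ring
      · simp

-- B's sorted set of in-range values IS the ascending occupied list peOcc
lemma peSorted_eq (vals : List Int) (n : Nat) :
    PySem.List.sorted (PySem.Set.ofList (vals.filter (fun v => decide (0 ≤ v ∧ v < (n : Int))))) (fun x => x)
      = peOcc vals n := by
  apply PySem.List.sorted_eq_of_perm_of_pairwise_lt
  · rw [List.perm_ext_iff_of_nodup ((peOcc_pairwise vals n).imp ne_of_lt) (PySem.Set.nodup_ofList _)]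
    intro v
    rw [peOcc_mem, PySem.Set.mem_ofList, List.mem_filter]
    simp
    tauto
  · exact peOcc_pairwise vals n

lemma peAlt_eq (vals : List Int) (inc : Int) (n : Nat) :
    get_expansion_alt vals (n : Int) inc
      = (PySem.List.enumerate (peOcc vals n) 0).map (peG inc) := by
  unfold get_expansion_alt
  rw [peSorted_eq]
  rfl

-- ===== VERDICT (by name: the statement is the Claim_ definition above) =====
theorem get_expansion_spec : Claim_equal_get_expansion := by
  intro vals max_val inc _hdom
  unfold Spec_get_expansion
  by_cases h : 0 ≤ max_val
  · obtain ⟨n, rfl⟩ : ∃ n : Nat, max_val = (n : Int) := ⟨max_val.toNat, (Int.toNat_of_nonneg h).symm⟩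
    rw [peAlt_eq]
    unfold get_expansion
    rw [peMain]
  · have hr : PySem.List.pyRange 0 max_val 1 = [] := by
      simp only [PySem.List.pyRange, one_ne_zero, ↓reduceIte, one_mul, zero_add, zero_lt_one,
        sub_zero, add_sub_cancel_right, EuclideanDomain.div_one, List.map_eq_nil_iff,
        List.range_eq_nil, ite_eq_right_iff, Int.toNat_eq_zero]
      omega
    have hf : vals.filter (fun v => decide (0 ≤ v ∧ v < max_val)) = [] := by
      rw [List.filter_eq_nil_iff]; intro v _; simp; omega
    unfold get_expansion get_expansion_alt
    rw [hr, hf]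
    rfl
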